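-- pv_equiv track=rewrite | github.com/daniel-reich/ubiquitous-fiesta | bJxNHk7aovkx8Q776_16.py | gold_distribution
-- ===== SOURCE A (Python) =====
-- def gold_distribution(gold):
--   ans=[0,0]
--   side=0
--   while True:
--     if len(gold)>2:
--       if gold[0]<gold[-1]:
--         ans[side]+=gold[-1]
--         gold=gold[:-1]
--       else:
--         ans[side]+=gold[0]
--         gold=gold[1:]
--       side=not side
--     else:
--       ans[side]+=max(gold)
--       ans[not side]+=min(gold)
--       return ans
-- ===== SOURCE B (Python) =====
-- def gold_distribution(gold):
--   i, j = 0, len(gold) - 1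
--   a = [0, 0]
--   side = 0
--   while j - i >= 2:
--     if gold[i] < gold[j]:
--       a[side] += gold[j]
--       j -= 1
--     else:
--       a[side] += gold[i]
--       i += 1
--     side = 1 - side
--   if gold[i] >= gold[j]:
--     hi, lo = gold[i], gold[j]
--   else:
--     hi, lo = gold[j], gold[i]
--   a[side] += hi
--   a[1 - side] += lo
--   return a
-- ===== Notes on version B (the rewrite author's own statement) =====
-- stated objective: faster
-- what changed: Replaced A's while-loop that copies the list by slicing gold[:-1]/gold[1:] each round with a single two-pointer index scan over the original list.
-- outside the precondition, e.g. on gold_distribution([]): A raises ValueError, B raises IndexError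
import Mathlib
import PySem

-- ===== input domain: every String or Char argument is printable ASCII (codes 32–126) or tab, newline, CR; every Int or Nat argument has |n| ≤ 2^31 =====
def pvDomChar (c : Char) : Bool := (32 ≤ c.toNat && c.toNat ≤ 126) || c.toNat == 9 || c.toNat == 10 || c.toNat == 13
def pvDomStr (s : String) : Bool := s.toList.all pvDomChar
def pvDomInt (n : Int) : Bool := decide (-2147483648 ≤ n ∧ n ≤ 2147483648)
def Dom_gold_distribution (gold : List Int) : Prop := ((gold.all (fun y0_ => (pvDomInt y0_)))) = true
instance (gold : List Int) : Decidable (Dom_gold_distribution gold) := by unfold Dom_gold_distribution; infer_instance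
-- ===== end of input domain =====

-- B is a two-pointer index scan (O(n)) replacing A's repeated list slicing (O(n^2)); return value only, no mutation observable.

-- ===== PORT A =====
-- ans[side] += v  (side False = index 0, True = index 1), state kept as a pair
def pvAddSide (a : Int × Int) (side : Bool) (v : Int) : Int × Int :=
  if side then (a.1, a.2 + v) else (a.1 + v, a.2)

-- the while-loop of A: slices gold[:-1] / gold[1:] each round (PySem.List.slice is exact)
def goldALoop (gold : List Int) (ans : Int × Int) (side : Bool) : List Int :=
  if h : 2 < gold.length then
    let g0 := PySem.List.pyGetD gold 0 0
    let gn := PySem.List.pyGetD gold (-1) 0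
    if g0 < gn then
      goldALoop (PySem.List.slice gold none (some (-1))) (pvAddSide ans side gn) (!side)
    else
      goldALoop (PySem.List.slice gold (some 1) none) (pvAddSide ans side g0) (!side)
  else
    -- max(gold)/min(gold); .getD 0 is never taken inside Pre_ (gold nonempty here)
    let mx := (PySem.List.max? gold (fun y => y)).getD 0
    let mn := (PySem.List.min? gold (fun y => y)).getD 0
    let a1 := pvAddSide ans side mx
    let a2 := pvAddSide a1 (!side) mn
    [a2.1, a2.2]
termination_by gold.length
decreasing_by
  · simp [PySem.List.slice_to_neg_one, List.length_dropLast]; omega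
  · simp [PySem.List.slice_from_one, List.length_tail]; omega

def gold_distribution (gold : List Int) : List Int :=
  goldALoop gold (0, 0) false

-- ===== PORT B =====
-- two-pointer loop over indices i..j (inclusive), no slicing
def goldBLoop (gold : List Int) (i j : Nat) (ans : Int × Int) (side : Bool) : List Int :=
  if h : i + 2 ≤ j then
    let gi := PySem.List.pyGetD gold (i : Int) 0
    let gj := PySem.List.pyGetD gold (j : Int) 0
    if gi < gj then
      goldBLoop gold i (j - 1) (pvAddSide ans side gj) (!side)
    else
      goldBLoop gold (i + 1) j (pvAddSide ans side gi) (!side)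
  else
    let gi := PySem.List.pyGetD gold (i : Int) 0
    let gj := PySem.List.pyGetD gold (j : Int) 0
    let hl := if gj ≤ gi then (gi, gj) else (gj, gi)
    let a1 := pvAddSide ans side hl.1
    let a2 := pvAddSide a1 (!side) hl.2
    [a2.1, a2.2]
termination_by j - i

def gold_distribution_alt (gold : List Int) : List Int :=
  goldBLoop gold 0 (gold.length - 1) (0, 0) false

-- ===== PRECONDITION & SPEC =====
-- Pre_ excludes only the empty list, on which A raises ValueError (max of empty sequence)
def Pre_gold_distribution (gold : List Int) : Prop := gold ≠ []
instance (gold : List Int) : Decidable (Pre_gold_distribution gold) := by unfold Pre_gold_distribution; infer_instance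
def pvWitness_gold_distribution : List Int := [3, 1, 2]

def Spec_gold_distribution (gold : List Int) (out : List Int) : Prop := out = gold_distribution_alt gold
instance (gold : List Int) (out : List Int) : Decidable (Spec_gold_distribution gold out) := by unfold Spec_gold_distribution; infer_instance

-- ===== CLAIM (what is proved, stated in full; the proofs are below) =====
def Claim_equal_gold_distribution : Prop := ∀ (gold : List Int), Dom_gold_distribution gold → Pre_gold_distribution gold → Spec_gold_distribution gold (gold_distribution gold)

-- ===== LEMMAS AND PROOFS =====

-- A's loop on the segment gold[i..j] equals B's index loop: helper facts about the segment
lemma seg_len (gold : List Int) (i j : Nat) (hij : i ≤ j) (hj : j < gold.length) :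
    ((gold.drop i).take (j + 1 - i)).length = j + 1 - i := by
  simp; omega

lemma seg_get0 (gold : List Int) (i j : Nat) (hij : i ≤ j) (hj : j < gold.length) :
    PySem.List.pyGetD ((gold.drop i).take (j + 1 - i)) 0 0 = PySem.List.pyGetD gold (i:Int) 0 := by
  simp [PySem.List.pyGetD_zero, List.getD_eq_getElem?_getD, List.getElem?_drop, hij]

lemma seg_getlast (gold : List Int) (i j : Nat) (hij : i ≤ j) (hj : j < gold.length) :
    PySem.List.pyGetD ((gold.drop i).take (j + 1 - i)) (-1) 0 = PySem.List.pyGetD gold (j:Int) 0 := by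
  have hne : ((gold.drop i).take (j + 1 - i)) ≠ [] := by
    simp [List.take_eq_nil_iff]; omega
  rw [PySem.List.pyGetD_neg_one _ _ hne, List.getLast_eq_getElem]
  simp [seg_len gold i j hij hj, List.getElem_take, List.getElem_drop,
    List.getD_eq_getElem?_getD, hj]
  have h2 : i + (j + 1 - i - 1) = j := by omega
  simp [h2]

lemma seg_dropLast (gold : List Int) (i j : Nat) (hij : i ≤ j) (hj : j < gold.length) :
    PySem.List.slice ((gold.drop i).take (j + 1 - i)) none (some (-1))
      = (gold.drop i).take (j - i) := by
  rw [PySem.List.slice_to_neg_one, List.dropLast_eq_take, seg_len gold i j hij hj, List.take_take]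
  congr 1; omega

lemma seg_tail (gold : List Int) (i j : Nat) (hij : i ≤ j) (hj : j < gold.length) :
    PySem.List.slice ((gold.drop i).take (j + 1 - i)) (some 1) none
      = (gold.drop (i+1)).take (j + 1 - (i+1)) := by
  rw [PySem.List.slice_from_one]
  rw [show ((gold.drop i).take (j + 1 - i)).tail = ((gold.drop i).take (j + 1 - i)).drop 1 from by simp]
  rw [List.drop_take, List.drop_drop]
  congr 1

lemma seg_single (gold : List Int) (i : Nat) (hj : i < gold.length) :
    (gold.drop i).take 1 = [gold[i]] := by
  rw [List.take_one, List.head?_drop, List.getElem?_eq_getElem hj]; rfl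

lemma seg_pair (gold : List Int) (i : Nat) (hj : i + 1 < gold.length) :
    (gold.drop i).take 2 = [gold[i], gold[i+1]] := by
  apply List.ext_getElem
  · simp; omega
  · intro k hk _
    have hk2 : k < 2 := by simp at hk; omega
    interval_cases k <;> simp [List.getElem_take, List.getElem_drop]

-- the terminating round: A's max/min of the 1- or 2-element remainder = B's hi/lo pick
lemma goldA_seg_eq_goldB_base (gold : List Int) (i j : Nat)
    (hij : i ≤ j) (hj : j < gold.length) (hc : ¬ i + 2 ≤ j) (ans : Int × Int) (side : Bool) :
    goldALoop ((gold.drop i).take (j + 1 - i)) ans side = goldBLoop gold i j ans side := by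
  rw [goldALoop, goldBLoop]
  rw [dif_neg (by rw [seg_len gold i j hij hj]; omega), dif_neg hc]
  have hgi : PySem.List.pyGetD gold (i:Int) 0 = gold[i] := by
    simp [List.getD_eq_getElem?_getD, List.getElem?_eq_getElem (by omega : i < gold.length)]
  have hgj : PySem.List.pyGetD gold (j:Int) 0 = gold[j] := by
    simp [List.getD_eq_getElem?_getD, List.getElem?_eq_getElem hj]
  rcases Nat.eq_or_lt_of_le hij with heq | hlt
  · subst heq
    rw [show i + 1 - i = 1 from by omega, seg_single gold i hj,
      PySem.List.max?_id_cons, PySem.List.min?_id_cons]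
    simp [hgi]
  · have hji : j = i + 1 := by omega
    subst hji
    rw [show i + 1 + 1 - i = 2 from by omega, seg_pair gold i hj,
      PySem.List.max?_id_cons, PySem.List.min?_id_cons]
    simp only [hgi, hgj, List.foldl_cons, List.foldl_nil, Option.getD_some]
    have hmax : max gold[i] gold[i+1] = (if gold[i+1] ≤ gold[i] then (gold[i], gold[i+1]) else (gold[i+1], gold[i])).1 := by
      rw [max_def]; split_ifs <;> omega
    have hmin : min gold[i] gold[i+1] = (if gold[i+1] ≤ gold[i] then (gold[i], gold[i+1]) else (gold[i+1], gold[i])).2 := by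
      rw [min_def]; split_ifs <;> omega
    rw [hmax, hmin]

lemma goldA_seg_eq_goldB (gold : List Int) (n i j : Nat) (hn : j - i ≤ n)
    (hij : i ≤ j) (hj : j < gold.length) (ans : Int × Int) (side : Bool) :
    goldALoop ((gold.drop i).take (j + 1 - i)) ans side = goldBLoop gold i j ans side := by
  induction n generalizing i j ans side with
  | zero => exact goldA_seg_eq_goldB_base gold i j hij hj (by omega) ans side
  | succ n ih =>
    by_cases hc : i + 2 ≤ j
    · rw [goldALoop, goldBLoop]
      rw [dif_pos (by rw [seg_len gold i j hij hj]; omega), dif_pos hc]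
      simp only [seg_get0 gold i j hij hj, seg_getlast gold i j hij hj,
        seg_dropLast gold i j hij hj, seg_tail gold i j hij hj]
      by_cases hlt : PySem.List.pyGetD gold (i:Int) 0 < PySem.List.pyGetD gold (j:Int) 0
      · rw [if_pos hlt, if_pos hlt]
        have : (gold.drop i).take (j - i) = (gold.drop i).take ((j-1) + 1 - i) := by
          congr 1; omega
        rw [this]
        exact ih i (j-1) (by omega) (by omega) (by omega) _ _
      · rw [if_neg hlt, if_neg hlt]
        exact ih (i+1) j (by omega) (by omega) hj _ _
    · exact goldA_seg_eq_goldB_base gold i j hij hj hc ans side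

-- ===== VERDICT (by name: the statement is the Claim_ definition above) =====
theorem gold_distribution_spec : Claim_equal_gold_distribution := by
  intro gold _hdom hpre
  unfold Spec_gold_distribution gold_distribution gold_distribution_alt
  have hne : gold.length ≠ 0 := by
    simpa [List.length_eq_zero_iff] using hpre
  have h := goldA_seg_eq_goldB gold (gold.length - 1) 0 (gold.length - 1)
      (by omega) (by omega) (by omega) (0, 0) false
  have hseg : (gold.drop 0).take (gold.length - 1 + 1 - 0) = gold := by
    simp; omega
  rw [hseg] at h
  exact h
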